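-- pv_equiv track=rewrite | github.com/mfjkri/cdc-helper | src/website_handler.py | check_if_same_sessions
-- ===== SOURCE A (Python) =====
-- from typing import Dict, List, Union
--
-- def check_if_same_sessions(session0:Dict, session1:Dict):
--     for date_str, time_slots in session0.items():
--         if date_str not in session1:
--             return True
--         else:
--             for time_slot in time_slots:
--                 if time_slot not in session1[date_str]:
--                     return True
--
--     for date_str, time_slots in session1.items():
--         if date_str not in session0:
--             return True
--         else:
--             for time_slot in time_slots:
--                 if time_slot not in session0[date_str]:
--                     return True
--
--     return False
-- ===== SOURCE B (Python) =====
-- def check_if_same_sessions(session0, session1):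
--     if set(session0) != set(session1):
--         return True
--     for date_str, time_slots in session0.items():
--         if set(time_slots) != set(session1[date_str]):
--             return True
--     return False
-- ===== Notes on version B (the rewrite author's own statement) =====
-- stated objective: simpler
-- what changed: B replaces A's two symmetric element-wise membership scans by one up-front key-set comparison followed by a single pass comparing each date's slot set to its counterpart.
import Mathlib
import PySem

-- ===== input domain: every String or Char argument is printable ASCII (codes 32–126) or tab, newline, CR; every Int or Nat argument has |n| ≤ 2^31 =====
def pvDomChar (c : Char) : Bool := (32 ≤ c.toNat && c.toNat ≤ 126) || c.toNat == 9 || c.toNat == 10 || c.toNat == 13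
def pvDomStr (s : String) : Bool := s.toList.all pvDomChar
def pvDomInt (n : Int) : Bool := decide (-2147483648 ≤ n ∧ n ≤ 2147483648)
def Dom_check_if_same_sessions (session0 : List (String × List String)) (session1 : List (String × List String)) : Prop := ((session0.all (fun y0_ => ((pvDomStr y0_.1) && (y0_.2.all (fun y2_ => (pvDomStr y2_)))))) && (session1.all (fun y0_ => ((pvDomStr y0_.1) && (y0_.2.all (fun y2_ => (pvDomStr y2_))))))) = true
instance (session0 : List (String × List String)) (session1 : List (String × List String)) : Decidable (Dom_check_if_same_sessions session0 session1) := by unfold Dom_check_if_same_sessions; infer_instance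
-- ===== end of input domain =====

-- B replaces A's two symmetric element-wise membership scans by one up-front key-set
-- comparison plus a single pass comparing each date's slot set to its counterpart (objective: simpler).


-- ===== PORT A =====
-- one loop of A: 'for date_str, time_slots in src.items(): if date_str not in other: return True
--                 else: for t in time_slots: if t not in other[date_str]: return True'
def pvScanA : List (String × List String) → List (String × List String) → Bool
  | [], _ => false
  | (d, ts) :: rest, other =>
    match List.lookup d other with
    | none => true
    | some os => if ts.any (fun t => !(os.contains t)) then true else pvScanA rest other

def check_if_same_sessions (session0 : List (String × List String)) (session1 : List (String × List String)) : Bool :=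
  if pvScanA session0 session1 then true
  else if pvScanA session1 session0 then true
  else false

-- ===== PORT B =====
-- B's loop: 'for date_str, time_slots in session0.items(): if set(time_slots) != set(session1[date_str]): return True'
-- (session1[date_str] cannot raise here: B only runs the loop after the key sets compared equal; .getD [] is that unreachable KeyError branch)
def pvLoopB : List (String × List String) → List (String × List String) → Bool
  | [], _ => false
  | (d, ts) :: rest, s1 =>
    if !(PySem.Set.equal (PySem.Set.ofList ts) (PySem.Set.ofList ((List.lookup d s1).getD []))) then true
    else pvLoopB rest s1

def check_if_same_sessions_alt (session0 : List (String × List String)) (session1 : List (String × List String)) : Bool :=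
  if !(PySem.Set.equal (PySem.Set.ofList (session0.map Prod.fst)) (PySem.Set.ofList (session1.map Prod.fst))) then true
  else pvLoopB session0 session1

-- ===== PRECONDITION & SPEC =====
-- Pre_ requires each association list to have distinct keys: an association list with a duplicate
-- key does not represent any Python dict (the inputs of A and B), so nothing is claimed there.
def Pre_check_if_same_sessions (session0 : List (String × List String)) (session1 : List (String × List String)) : Prop :=
  (session0.map Prod.fst).Nodup ∧ (session1.map Prod.fst).Nodup
instance (session0 : List (String × List String)) (session1 : List (String × List String)) : Decidable (Pre_check_if_same_sessions session0 session1) := by unfold Pre_check_if_same_sessions; infer_instance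
def pvWitness_check_if_same_sessions : (List (String × List String)) × (List (String × List String)) :=
  ([("2023-01-01", ["10:00", "11:00"])], [("2023-01-01", ["11:00"])])
def Spec_check_if_same_sessions (session0 : List (String × List String)) (session1 : List (String × List String)) (out : Bool) : Prop := out = check_if_same_sessions_alt session0 session1
instance (session0 : List (String × List String)) (session1 : List (String × List String)) (out : Bool) : Decidable (Spec_check_if_same_sessions session0 session1 out) := by unfold Spec_check_if_same_sessions; infer_instance

-- ===== CLAIM (what is proved, stated in full; the proofs are below) =====
def Claim_equal_check_if_same_sessions : Prop := ∀ (session0 : List (String × List String)) (session1 : List (String × List String)), Dom_check_if_same_sessions session0 session1 → Pre_check_if_same_sessions session0 session1 → Spec_check_if_same_sessions session0 session1 (check_if_same_sessions session0 session1)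

-- ===== LEMMAS AND PROOFS =====

theorem lk_mem {α β : Type} [BEq α] [LawfulBEq α] (d : α) (v : β) (l : List (α × β)) (h : List.lookup d l = some v) : (d, v) ∈ l := by
  induction l with
  | nil => simp [List.lookup] at h
  | cons p rest ih =>
    obtain ⟨k, w⟩ := p
    rw [List.lookup] at h
    cases hbe : (d == k) with
    | true =>
      rw [hbe] at h
      simp at h
      have : d = k := eq_of_beq hbe
      subst this; subst h; exact List.mem_cons_self
    | false =>
      rw [hbe] at h
      exact List.mem_cons_of_mem _ (ih h)

theorem lk_of_mem {α β : Type} [BEq α] [LawfulBEq α] (d : α) (v : β) (l : List (α × β)) (hn : (l.map Prod.fst).Nodup) (h : (d, v) ∈ l) : List.lookup d l = some v := by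
  induction l with
  | nil => simp at h
  | cons p rest ih =>
    obtain ⟨k, w⟩ := p
    rw [List.lookup]
    rcases List.mem_cons.1 h with h1 | h1
    · rw [show d = k from congrArg Prod.fst h1]
      simp
      exact (congrArg Prod.snd h1).symm
    · have hd : d ≠ k := by
        intro he; subst he
        exact (List.nodup_cons.1 hn).1 (List.mem_map.2 ⟨(d, v), h1, rfl⟩)
      rw [show (d == k) = false from beq_eq_false_iff_ne.2 hd]
      exact ih (List.nodup_cons.1 hn).2 h1

theorem lk_isSome {α β : Type} [BEq α] [LawfulBEq α] (d : α) (l : List (α × β)) : (List.lookup d l).isSome ↔ d ∈ l.map Prod.fst := by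
  induction l with
  | nil => simp [List.lookup]
  | cons p rest ih =>
    obtain ⟨k, w⟩ := p
    rw [List.lookup]
    by_cases hd : d = k
    · subst hd; simp
    · rw [show (d == k) = false from beq_eq_false_iff_ne.2 hd]
      simp [ih, hd]

theorem setEq_iff (xs ys : List String) : PySem.Set.equal (PySem.Set.ofList xs) (PySem.Set.ofList ys) = true ↔ ∀ x, x ∈ xs ↔ x ∈ ys := by
  simp only [PySem.Set.equal, Bool.and_eq_true, PySem.Set.issubset_iff, PySem.Set.mem_ofList]
  constructor
  · rintro ⟨h1, h2⟩ x; exact ⟨fun hx => h1 x hx, fun hx => h2 x hx⟩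
  · intro h; exact ⟨fun x hx => (h x).1 hx, fun x hx => (h x).2 hx⟩

theorem scanA_false_iff (src other : List (String × List String)) :
    pvScanA src other = false ↔ ∀ p ∈ src, ∃ os, List.lookup p.1 other = some os ∧ ∀ t ∈ p.2, t ∈ os := by
  induction src with
  | nil => simp [pvScanA]
  | cons p rest ih =>
    obtain ⟨d, ts⟩ := p
    rw [pvScanA]
    cases hlk : List.lookup d other with
    | none => simp [hlk]
    | some os =>
      dsimp only
      by_cases hany : (ts.any (fun t => !(os.contains t))) = true
      · rw [if_pos hany]
        constructor
        · intro h; cases h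
        · intro h
          exfalso
          obtain ⟨t, ht, htn⟩ : ∃ t ∈ ts, t ∉ os := by
            simpa [List.contains_eq_mem] using hany
          obtain ⟨os', hos', hsub⟩ := h (d, ts) List.mem_cons_self
          rw [hlk] at hos'
          injection hos' with he
          exact htn (by rw [he]; exact hsub t ht)
      · rw [if_neg hany, ih]
        constructor
        · intro h q hq
          rcases List.mem_cons.1 hq with h1 | h1
          · subst h1
            refine ⟨os, hlk, ?_⟩
            intro t ht
            by_contra htn
            exact hany (by simp only [List.any_eq_true, Bool.not_eq_true', List.contains_eq_mem, decide_eq_false_iff_not]; exact ⟨t, ht, htn⟩)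
          · exact h q h1
        · intro h q hq; exact h q (List.mem_cons_of_mem _ hq)

theorem loopB_false_iff (src s1 : List (String × List String)) :
    pvLoopB src s1 = false ↔ ∀ p ∈ src, PySem.Set.equal (PySem.Set.ofList p.2) (PySem.Set.ofList ((List.lookup p.1 s1).getD [])) = true := by
  induction src with
  | nil => simp [pvLoopB]
  | cons p rest ih =>
    obtain ⟨d, ts⟩ := p
    rw [pvLoopB]
    by_cases heq : PySem.Set.equal (PySem.Set.ofList ts) (PySem.Set.ofList ((List.lookup d s1).getD [])) = true
    · rw [if_neg (by simp [heq]), ih]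
      constructor
      · intro h q hq
        rcases List.mem_cons.1 hq with h1 | h1
        · subst h1; exact heq
        · exact h q h1
      · intro h q hq; exact h q (List.mem_cons_of_mem _ hq)
    · have hf : PySem.Set.equal (PySem.Set.ofList ts) (PySem.Set.ofList ((List.lookup d s1).getD [])) = false :=
        Bool.eq_false_iff.2 heq
      rw [if_pos (by simp [hf])]
      constructor
      · intro h; cases h
      · intro h
        exact absurd (h (d, ts) List.mem_cons_self) (by simp [hf])

theorem main_iff (s0 s1 : List (String × List String))
    (hn0 : (s0.map Prod.fst).Nodup) (hn1 : (s1.map Prod.fst).Nodup) :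
    check_if_same_sessions s0 s1 = check_if_same_sessions_alt s0 s1 := by
  have key : (check_if_same_sessions s0 s1 = false) ↔ (check_if_same_sessions_alt s0 s1 = false) := by
    unfold check_if_same_sessions check_if_same_sessions_alt
    constructor
    · intro h
      have hA : pvScanA s0 s1 = false ∧ pvScanA s1 s0 = false := by
        by_cases h1 : pvScanA s0 s1 = true
        · simp [h1] at h
        · by_cases h2 : pvScanA s1 s0 = true
          · simp [h2] at h
          · exact ⟨Bool.eq_false_iff.2 h1, Bool.eq_false_iff.2 h2⟩
      have hC1 := (scanA_false_iff s0 s1).1 hA.1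
      have hC2 := (scanA_false_iff s1 s0).1 hA.2
      have hkeys : PySem.Set.equal (PySem.Set.ofList (s0.map Prod.fst)) (PySem.Set.ofList (s1.map Prod.fst)) = true := by
        rw [setEq_iff]
        intro d
        constructor
        · intro hd
          obtain ⟨p, hp, hpd⟩ := List.mem_map.1 hd
          obtain ⟨os, hos, _⟩ := hC1 p hp
          rw [hpd] at hos
          exact (lk_isSome d s1).1 (by rw [hos]; rfl)
        · intro hd
          obtain ⟨p, hp, hpd⟩ := List.mem_map.1 hd
          obtain ⟨os, hos, _⟩ := hC2 p hp
          rw [hpd] at hos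
          exact (lk_isSome d s0).1 (by rw [hos]; rfl)
      have hloop : pvLoopB s0 s1 = false := by
        rw [loopB_false_iff]
        rintro ⟨d, ts⟩ hp
        obtain ⟨os, hos, hsub⟩ := hC1 (d, ts) hp
        simp only [hos, Option.getD_some]
        rw [setEq_iff]
        intro t
        constructor
        · exact fun ht => hsub t ht
        · intro ht
          obtain ⟨v, hv, hsub'⟩ := hC2 (d, os) (lk_mem d os s1 hos)
          have hveq : v = ts := by
            have hts := lk_of_mem d ts s0 hn0 hp
            rw [hts] at hv
            injection hv with he
            exact he.symm
          exact hveq ▸ hsub' t ht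
      simp [hkeys, hloop]
    · intro h
      have hkeys : PySem.Set.equal (PySem.Set.ofList (s0.map Prod.fst)) (PySem.Set.ofList (s1.map Prod.fst)) = true := by
        by_contra hk
        have hf : PySem.Set.equal (PySem.Set.ofList (s0.map Prod.fst)) (PySem.Set.ofList (s1.map Prod.fst)) = false :=
          Bool.eq_false_iff.2 hk
        rw [if_pos (by simp [hf])] at h
        cases h
      have hloop : pvLoopB s0 s1 = false := by
        rw [if_neg (by simp [hkeys])] at h
        exact h
      have hkeys' := (setEq_iff _ _).1 hkeys
      have hB := (loopB_false_iff s0 s1).1 hloop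
      have hC1 : pvScanA s0 s1 = false := by
        rw [scanA_false_iff]
        rintro ⟨d, ts⟩ hp
        have hd1 : d ∈ s1.map Prod.fst := (hkeys' d).1 (List.mem_map.2 ⟨(d, ts), hp, rfl⟩)
        obtain ⟨os, hos⟩ := Option.isSome_iff_exists.1 ((lk_isSome d s1).2 hd1)
        refine ⟨os, hos, ?_⟩
        have hset := hB (d, ts) hp
        simp only [hos, Option.getD_some] at hset
        intro t ht
        exact ((setEq_iff ts os).1 hset t).1 ht
      have hC2 : pvScanA s1 s0 = false := by
        rw [scanA_false_iff]
        rintro ⟨d, os⟩ hq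
        have hd0 : d ∈ s0.map Prod.fst := (hkeys' d).2 (List.mem_map.2 ⟨(d, os), hq, rfl⟩)
        obtain ⟨ts, hts⟩ := Option.isSome_iff_exists.1 ((lk_isSome d s0).2 hd0)
        refine ⟨ts, hts, ?_⟩
        have hmem : (d, ts) ∈ s0 := lk_mem d ts s0 hts
        have hset := hB (d, ts) hmem
        have hlk1 : List.lookup d s1 = some os := lk_of_mem d os s1 hn1 hq
        simp only [hlk1, Option.getD_some] at hset
        intro t ht
        exact ((setEq_iff ts os).1 hset t).2 ht
      simp [hC1, hC2]
  cases hA : check_if_same_sessions s0 s1 <;> cases hB : check_if_same_sessions_alt s0 s1 <;> simp_all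

-- ===== VERDICT (by name: the statement is the Claim_ definition above) =====
theorem check_if_same_sessions_spec : Claim_equal_check_if_same_sessions := by
  intro s0 s1 _ hpre
  unfold Spec_check_if_same_sessions
  exact main_iff s0 s1 hpre.1 hpre.2
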